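-- pv_equiv track=rewrite | github.com/christopheprudent/python-exercices | list/e157_list_interleave_elements_of_list_of_lists.py | interleave_elements_of_list_of_lists
-- ===== SOURCE A (Python) =====
-- def interleave_elements_of_list_of_lists(ll):
--     _nol = len(ll)
--     _max = max(len(x) for x in ll)
--     result = []
--     for i in range(_max):
--         for j in range(_nol):
--             if i < len(ll[j]):
--                 result.append(ll[j][i])
--
--     return result
-- ===== SOURCE B (Python) =====
-- def interleave_elements_of_list_of_lists(ll):
--     # Column-by-column: peel the heads of all non-empty rows, then move to the tails.
--     result = []
--     cols = ll
--     while any(cols):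
--         result.extend(row[0] for row in cols if row)
--         cols = [row[1:] for row in cols]
--     return result
-- ===== Notes on version B (the rewrite author's own statement) =====
-- stated objective: alternative
-- what changed: Replaces the double index loop with explicit bounds checks (range over the precomputed max length, then range over row indices with ll[j][i]) by a column-peeling loop that repeatedly collects the heads of the non-empty rows and recurses on the tails, with no indexing and no max() pass.
import Mathlib
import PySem

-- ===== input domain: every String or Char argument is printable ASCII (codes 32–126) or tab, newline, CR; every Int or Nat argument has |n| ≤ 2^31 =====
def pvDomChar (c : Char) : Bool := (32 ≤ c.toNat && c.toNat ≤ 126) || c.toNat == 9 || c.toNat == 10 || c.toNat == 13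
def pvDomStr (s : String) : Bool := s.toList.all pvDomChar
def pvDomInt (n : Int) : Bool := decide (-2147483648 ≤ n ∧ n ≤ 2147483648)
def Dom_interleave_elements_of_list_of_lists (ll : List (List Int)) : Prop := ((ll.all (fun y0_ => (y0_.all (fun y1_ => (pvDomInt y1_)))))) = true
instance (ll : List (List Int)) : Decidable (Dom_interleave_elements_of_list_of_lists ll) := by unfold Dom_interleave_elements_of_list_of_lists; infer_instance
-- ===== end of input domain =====

-- B replaces the index double loop by a column-peeling recursion (heads of non-empty rows, then tails); equal return values on nonempty ll.

-- ===== PORT A =====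
def interleave_elements_of_list_of_lists (ll : List (List Int)) : List Int :=
  let nol : Int := ll.length
  match PySem.List.max? (ll.map (fun x => ((x.length : Int)))) (fun y => y) with
  | none => []   -- Python raises ValueError here (max of empty); excluded by Pre_
  | some mx =>
    (PySem.List.pyRange 0 mx 1).foldl (fun result i =>
      (PySem.List.pyRange 0 nol 1).foldl (fun result j =>
        if i < ((PySem.List.pyGetD ll j []).length : Int) then
          result ++ [PySem.List.pyGetD (PySem.List.pyGetD ll j []) i 0]
        else result) result) []

-- ===== PORT B =====
-- termination helpers for the while loop (sum of row lengths strictly decreases)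
theorem pvTailSumLe (cols : List (List Int)) :
    ((cols.map List.tail).map List.length).sum ≤ (cols.map List.length).sum := by
  induction cols with
  | nil => simp
  | cons x t ih =>
    simp only [List.map_cons, List.sum_cons, List.length_tail]
    omega

theorem pvTailSumLt (cols : List (List Int)) (h : cols.any (fun x => !x.isEmpty) = true) :
    ((cols.map List.tail).map List.length).sum < (cols.map List.length).sum := by
  induction cols with
  | nil => simp at h
  | cons x t ih =>
    simp only [List.any_cons, Bool.or_eq_true] at h
    simp only [List.map_cons, List.sum_cons, List.length_tail]
    rcases h with h | h
    · have hx : x ≠ [] := by simpa using h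
      have hxl : 0 < x.length := List.length_pos_iff.mpr hx
      have := pvTailSumLe t
      omega
    · have := ih h
      omega

def pvAltGo (cols : List (List Int)) : List Int :=
  if h : cols.any (fun x => !x.isEmpty) = true then
    (cols.filterMap List.head?) ++ pvAltGo (cols.map List.tail)
  else []
termination_by (cols.map List.length).sum
decreasing_by simpa using pvTailSumLt cols h

def interleave_elements_of_list_of_lists_alt (ll : List (List Int)) : List Int :=
  pvAltGo ll

-- ===== PRECONDITION & SPEC =====
-- Pre_ excludes only the empty outer list, on which Python A raises ValueError (max() of an empty sequence).
def Pre_interleave_elements_of_list_of_lists (ll : List (List Int)) : Prop := ll ≠ []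
instance (ll : List (List Int)) : Decidable (Pre_interleave_elements_of_list_of_lists ll) := by unfold Pre_interleave_elements_of_list_of_lists; infer_instance
def pvWitness_interleave_elements_of_list_of_lists : List (List Int) := [[1, 2], [3]]

def Spec_interleave_elements_of_list_of_lists (ll : List (List Int)) (out : List Int) : Prop := out = interleave_elements_of_list_of_lists_alt ll
instance (ll : List (List Int)) (out : List Int) : Decidable (Spec_interleave_elements_of_list_of_lists ll out) := by unfold Spec_interleave_elements_of_list_of_lists; infer_instance

-- ===== CLAIM (what is proved, stated in full; the proofs are below) =====
def Claim_equal_interleave_elements_of_list_of_lists : Prop := ∀ (ll : List (List Int)), Dom_interleave_elements_of_list_of_lists ll → Pre_interleave_elements_of_list_of_lists ll → Spec_interleave_elements_of_list_of_lists ll (interleave_elements_of_list_of_lists ll)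

-- ===== LEMMAS AND PROOFS =====

-- the i-th column: the i-th element of every row that has one, in row order
def pvCol (ll : List (List Int)) (i : Nat) : List Int := ll.filterMap (fun x => x[i]?)
-- both programs compute the concatenation of the first n columns
def pvSpec (ll : List (List Int)) (n : Nat) : List Int := (List.range n).flatMap (pvCol ll)

theorem pvCol_zero (ll : List (List Int)) : pvCol ll 0 = ll.filterMap List.head? := by
  unfold pvCol
  induction ll with
  | nil => rfl
  | cons x t ih => simp only [List.filterMap_cons, ih, List.head?_eq_getElem?]

theorem pvCol_succ (ll : List (List Int)) (i : Nat) :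
    pvCol ll (i + 1) = pvCol (ll.map List.tail) i := by
  unfold pvCol
  induction ll with
  | nil => rfl
  | cons x t ih =>
    have hx : x[i + 1]? = x.tail[i]? := by cases x <;> simp
    simp only [List.map_cons, List.filterMap_cons, ih, hx]

theorem pvAlt_eq_spec (n : Nat) : ∀ ll : List (List Int), (∀ x ∈ ll, x.length ≤ n) →
    pvAltGo ll = pvSpec ll n := by
  induction n with
  | zero =>
    intro ll h
    rw [pvAltGo.eq_def]
    have hc : ll.any (fun x => !x.isEmpty) = false := by
      rw [List.any_eq_false]
      intro x hx
      have hx0 : x = [] := List.length_eq_zero_iff.mp (Nat.le_zero.mp (h x hx))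
      simp [hx0]
    simp [hc, pvSpec]
  | succ n ih =>
    intro ll h
    rw [pvAltGo.eq_def]
    by_cases hc : ll.any (fun x => !x.isEmpty) = true
    · simp only [hc, dif_pos]
      have hb : ∀ y ∈ ll.map List.tail, y.length ≤ n := by
        intro y hy
        obtain ⟨x, hx, rfl⟩ := List.mem_map.mp hy
        have := h x hx
        simp only [List.length_tail]
        omega
      rw [ih _ hb]
      have hcs : pvSpec ll (n + 1) = pvCol ll 0 ++ pvSpec (ll.map List.tail) n := by
        rw [pvSpec, List.range_succ_eq_map, List.flatMap_cons, List.flatMap_map, pvSpec]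
        congr 1
        have hfn : (fun i => pvCol ll (Nat.succ i)) = fun i => pvCol (ll.map List.tail) i :=
          funext fun i => pvCol_succ ll i
        rw [hfn]
      rw [hcs, pvCol_zero]
    · have hc' : ll.any (fun x => !x.isEmpty) = false := by simpa using hc
      simp only [hc', Bool.false_eq_true, dite_false]
      have hall : ∀ x ∈ ll, x = [] := by
        rw [List.any_eq_false] at hc'
        intro x hx
        simpa using hc' x hx
      symm
      rw [pvSpec, List.flatMap_eq_nil_iff]
      intro i _
      rw [pvCol, List.filterMap_eq_nil_iff]
      intro x hx
      rw [hall x hx]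
      rfl

theorem pvInner_map (i : Int) (hi : 0 ≤ i) (ll : List (List Int)) :
    (ll.filter (fun x => decide (i < (x.length : Int)))).map (fun x => PySem.List.pyGetD x i 0)
      = pvCol ll i.toNat := by
  induction ll with
  | nil => rfl
  | cons x t ih =>
    by_cases hx : i < (x.length : Int)
    · have hlt : i.toNat < x.length := by omega
      rw [List.filter_cons_of_pos (by simpa using hx), List.map_cons,
        PySem.List.pyGetD_eq_getElem x 0 hi hx, ih]
      simp [pvCol, List.getElem?_eq_getElem hlt]
    · have hge : x.length ≤ i.toNat := by omega
      rw [List.filter_cons_of_neg (by simpa using hx), ih]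
      simp [pvCol, List.getElem?_eq_none hge]

theorem pvA_eq_spec (ll : List (List Int)) (mx : Int)
    (hmax : PySem.List.max? (ll.map (fun x => ((x.length : Int)))) (fun y => y) = some mx) :
    interleave_elements_of_list_of_lists ll = pvSpec ll mx.toNat := by
  unfold interleave_elements_of_list_of_lists
  rw [hmax]
  show (PySem.List.pyRange 0 mx 1).foldl (fun result i =>
      (PySem.List.pyRange 0 ((ll.length : Int)) 1).foldl (fun result j =>
        if i < ((PySem.List.pyGetD ll j []).length : Int) then
          result ++ [PySem.List.pyGetD (PySem.List.pyGetD ll j []) i 0]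
        else result) result) [] = pvSpec ll mx.toNat
  have hinner : ∀ (r : List Int) (i : Int), i ∈ PySem.List.pyRange 0 mx 1 →
      (PySem.List.pyRange 0 ((ll.length : Int)) 1).foldl (fun result j =>
        if i < ((PySem.List.pyGetD ll j []).length : Int) then
          result ++ [PySem.List.pyGetD (PySem.List.pyGetD ll j []) i 0]
        else result) r = r ++ pvCol ll i.toNat := by
    intro r i him
    have hi0 : 0 ≤ i := (PySem.List.mem_pyRange_one.mp him).1
    rw [PySem.List.foldl_pyRange_zero_pyGetD' ll []
      (fun result x => if i < ((x.length : Int)) then result ++ [PySem.List.pyGetD x i 0] else result) r]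
    rw [PySem.List.foldl_append_ite (fun x : List Int => i < ((x.length : Int)))
      (fun x => PySem.List.pyGetD x i 0), pvInner_map i hi0 ll]
  have houter : (PySem.List.pyRange 0 mx 1).foldl (fun result i =>
      (PySem.List.pyRange 0 ((ll.length : Int)) 1).foldl (fun result j =>
        if i < ((PySem.List.pyGetD ll j []).length : Int) then
          result ++ [PySem.List.pyGetD (PySem.List.pyGetD ll j []) i 0]
        else result) result) [] =
      (PySem.List.pyRange 0 mx 1).foldl (fun r i => r ++ pvCol ll i.toNat) [] :=
    PySem.List.foldl_congr_mem _ _ _ _ (fun acc x hx => hinner acc x hx)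
  rw [houter, PySem.List.pyRange_one, List.foldl_map, PySem.List.foldl_append_eq_flatMap]
  simp [pvSpec]

-- ===== VERDICT (by name: the statement is the Claim_ definition above) =====
theorem interleave_elements_of_list_of_lists_spec : Claim_equal_interleave_elements_of_list_of_lists := by
  intro ll _ hpre
  unfold Spec_interleave_elements_of_list_of_lists
  have hne : ll.map (fun x => ((x.length : Int))) ≠ [] := by
    simpa using hpre
  cases hmax : PySem.List.max? (ll.map (fun x => ((x.length : Int)))) (fun y => y) with
  | none => exact absurd ((PySem.List.max?_eq_none_iff _ _).mp hmax) hne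
  | some mx =>
    have hub : ∀ x ∈ ll, x.length ≤ mx.toNat := by
      intro x hx
      have := PySem.List.max?_isMax hmax _ (List.mem_map.mpr ⟨x, hx, rfl⟩)
      omega
    rw [pvA_eq_spec ll mx hmax, interleave_elements_of_list_of_lists_alt,
      pvAlt_eq_spec mx.toNat ll hub]
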